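-- pv_equiv track=rewrite | github.com/jaumebonet/RosettaSilentToolbox | rstoolbox/io/sequence.py | mlcs
-- ===== SOURCE A (Python) =====
-- import bisect
--
-- def mlcs(strings):
--     """Return a long common subsequence of the strings.
--
--     Uses a greedy algorithm, so the result is not necessarily the
--     longest common subsequence.
--
--     """
--     # https://codereview.stackexchange.com/a/90381/163119
--     if not strings:
--         raise ValueError("mlcs() argument is an empty sequence")
--     strings = list(set(strings))  # deduplicate
--     alphabet = set.intersection(*(set(s) for s in strings))
--
--     # indexes[letter][i] is list of indexes of letter in strings[i].
--     indexes = {letter: [[] for _ in strings] for letter in alphabet}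
--     for i, s in enumerate(strings):
--         for j, letter in enumerate(s):
--             if letter in alphabet:
--                 indexes[letter][i].append(j)
--
--     # pos[i] is current position of search in strings[i].
--     pos = [len(s) for s in strings]
--
--     # Generate candidate positions for next step in search.
--     def candidates():
--         for letter, letter_indexes in indexes.items():
--             distance, candidate = 0, []
--             for ind, p in zip(letter_indexes, pos):
--                 i = bisect.bisect_right(ind, p - 1) - 1
--                 q = ind[i]
--                 if i < 0 or q > p - 1:
--                     break
--                 candidate.append(q)
--                 distance += (p - q)**2
--             else:
--                 yield distance, letter, candidate
--
--     result = []
--     while True: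
--         try:
--             # Choose the closest candidate position, if any.
--             _, letter, pos = min(candidates())
--         except ValueError:
--             return ''.join(reversed(result))
--         result.append(letter)
-- ===== SOURCE B (Python) =====
-- def mlcs(strings):
--     """Return a long common subsequence of the strings (greedy approximation).
--
--     Same preamble as before, but no precomputed index table: candidate
--     positions are found on the fly with str.rfind, and the result string is
--     built front-to-back by prepending, so no final reverse is needed.
--     """
--     if not strings:
--         raise ValueError("mlcs() argument is an empty sequence")
--     strings = list(set(strings))  # deduplicate
--     alphabet = set.intersection(*(set(s) for s in strings))
--
--     def candidates(pos):
--         for letter in alphabet: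
--             distance, candidate = 0, []
--             for s, p in zip(strings, pos):
--                 q = s.rfind(letter, 0, p)
--                 if q < 0:
--                     break
--                 candidate.append(q)
--                 distance += (p - q) ** 2
--             else:
--                 yield distance, letter, candidate
--
--     pos = [len(s) for s in strings]
--     result = ''
--     while True:
--         try:
--             _, letter, pos = min(candidates(pos))
--         except ValueError:
--             return result
--         result = letter + result
-- ===== Notes on version B (the rewrite author's own statement) =====
-- stated objective: simpler
-- what changed: B drops the entire precomputed per-letter/per-string index table and the bisect search: each candidate position is found on the fly with str.rfind(letter, 0, pos[i]) (q < 0 means break), and the result string is built front-to-back by prepending, removing the final reverse-and-join.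
import Mathlib
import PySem

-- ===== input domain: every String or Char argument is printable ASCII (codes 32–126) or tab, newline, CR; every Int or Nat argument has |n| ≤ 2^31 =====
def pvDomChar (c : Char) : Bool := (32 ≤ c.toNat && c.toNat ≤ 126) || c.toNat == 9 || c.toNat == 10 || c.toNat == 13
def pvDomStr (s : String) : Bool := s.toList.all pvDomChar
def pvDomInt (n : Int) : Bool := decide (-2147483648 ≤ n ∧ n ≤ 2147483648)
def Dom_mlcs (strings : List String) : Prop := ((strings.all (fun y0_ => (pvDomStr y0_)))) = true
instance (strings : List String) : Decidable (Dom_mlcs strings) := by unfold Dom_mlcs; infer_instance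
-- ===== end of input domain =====

-- B drops A's precomputed per-letter index table and bisect search: candidate positions are
-- found on the fly with str.rfind, and the result is built by prepending (no final reverse);
-- objective: simpler. Note: the Python result is independent of the hash order of
-- set(strings) / the alphabet set (min has a unique minimum since letters are distinct keys),
-- so both ports consume those sets in first-occurrence order.

-- ===== PORT A =====
-- Shared by both ports (both Pythons compare the same (distance, letter, candidate) tuples in min()):
-- Python '<' on lists of ints
def pyListLtInt : List Int → List Int → Bool
  | _, [] => false
  | [], _ :: _ => true
  | a :: as, b :: bs => if a < b then true else if b < a then false else pyListLtInt as bs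

-- Python '<' on (distance, letter, candidate) tuples (letter is a 1-char string)
def candLt (x y : Int × Char × List Int) : Bool :=
  if x.1 < y.1 then true else if y.1 < x.1 then false
  else if x.2.1 < y.2.1 then true else if y.2.1 < x.2.1 then false
  else pyListLtInt x.2.2 y.2.2

-- min(iterable) over candidate tuples; none = ValueError on an empty iterable
def pyMin (l : List (Int × Char × List Int)) : Option (Int × Char × List Int) :=
  match l with
  | [] => none
  | x :: xs => some (xs.foldl (fun b c => if candLt c b then c else b) x)

-- A's inner 'for ind, p in zip(letter_indexes, pos): … else: …' (some = the for ran to its else)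
def candLoopA : List (List Int) → List Int → Int → List Int → Option (Int × List Int)
  | ind :: inds, p :: ps, dist, cand =>
    let i : Int := (PySem.List.bisectRight ind (p - 1) : Int) - 1
    match PySem.List.pyGet? ind i with
    | none => none   -- ind[i] with ind = []: unreachable, every alphabet letter occurs in every string
    | some q =>
      if i < 0 ∨ q > p - 1 then none
      else candLoopA inds ps (dist + (p - q) ^ 2) (cand ++ [q])
  | _, _, dist, cand => some (dist, cand)   -- zip stops at the shorter list

-- A's candidates() generator, consumed into a list
def candidatesA (items : List (Char × List (List Int))) (pos : List Int) :
    List (Int × Char × List Int) :=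
  items.filterMap (fun li => (candLoopA li.2 pos 0 []).map (fun dc => (dc.1, li.1, dc.2)))

-- A's 'while True' loop; fuel = 1 + total length bounds the iteration count (pos strictly decreases)
def mlcsLoopA : Nat → PySem.Dict Char (List (List Int)) → List Int → List Char → List Char
  | 0, _, _, res => res
  | fuel + 1, idx, pos, res =>
    match pyMin (candidatesA idx.items pos) with
    | none => res
    | some dlc => mlcsLoopA fuel idx dlc.2.2 (res ++ [dlc.2.1])

def mlcs (strings : List String) : String :=
  -- 'if not strings: raise ValueError' — the [] branch is unreachable under Pre_mlcs
  match PySem.Set.ofList strings with   -- strings = list(set(strings))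
  | [] => ""
  | s0 :: rest =>
    let strs := s0 :: rest
    let alphabet : PySem.Set Char :=   -- set.intersection(*(set(s) for s in strings))
      rest.foldl (fun a s => PySem.Set.inter a (PySem.Set.ofList s.toList))
        (PySem.Set.ofList s0.toList)
    let blank : List (List Int) := strs.map (fun _ => ([] : List Int))
    -- indexes = {letter: [[] for _ in strings] for letter in alphabet}
    let indexes0 : PySem.Dict Char (List (List Int)) :=
      alphabet.foldl (fun d c => d.insert c blank) PySem.Dict.empty
    -- for i, s in enumerate(strings): for j, letter in enumerate(s): if letter in alphabet: indexes[letter][i].append(j)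
    let indexes : PySem.Dict Char (List (List Int)) :=
      (PySem.List.enumerate strs 0).foldl (fun d is =>
        (PySem.List.enumerate is.2.toList 0).foldl (fun d jl =>
          if PySem.Set.contains alphabet jl.2 then
            d.modify jl.2 [] (fun ls =>
              PySem.List.pySetD ls is.1 (PySem.List.pyGetD ls is.1 [] ++ [jl.1]))
          else d) d) indexes0
    let pos0 := strs.map (fun s => (s.length : Int))   -- pos = [len(s) for s in strings]
    let fuel := (strs.map String.length).sum + 1
    String.ofList (mlcsLoopA fuel indexes pos0 []).reverse   -- ''.join(reversed(result))

-- ===== PORT B =====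
-- B's inner loop: 'for s, p in zip(strings, pos): q = s.rfind(letter, 0, p) …'
def candLoopB (c : Char) : List String → List Int → Int → List Int → Option (Int × List Int)
  | s :: ss, p :: ps, dist, cand =>
    let q := PySem.Str.rfindFrom s (String.ofList [c]) 0 (some p)
    if q < 0 then none
    else candLoopB c ss ps (dist + (p - q) ^ 2) (cand ++ [q])
  | _, _, dist, cand => some (dist, cand)   -- zip stops at the shorter list

-- B's candidates() generator, consumed into a list
def candidatesB (alphabet : List Char) (strings : List String) (pos : List Int) :
    List (Int × Char × List Int) :=
  alphabet.filterMap (fun c => (candLoopB c strings pos 0 []).map (fun dc => (dc.1, c, dc.2)))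

-- B's 'while True' loop: result built by PREPENDING (result = letter + result)
def mlcsLoopB : Nat → List Char → List String → List Int → List Char → List Char
  | 0, _, _, _, res => res
  | fuel + 1, al, strs, pos, res =>
    match pyMin (candidatesB al strs pos) with
    | none => res
    | some dlc => mlcsLoopB fuel al strs dlc.2.2 (dlc.2.1 :: res)

def mlcs_alt (strings : List String) : String :=
  match PySem.Set.ofList strings with
  | [] => ""   -- Python: raise ValueError — unreachable under Pre_mlcs
  | s0 :: rest =>
    let strs := s0 :: rest
    let alphabet : PySem.Set Char :=
      rest.foldl (fun a s => PySem.Set.inter a (PySem.Set.ofList s.toList))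
        (PySem.Set.ofList s0.toList)
    let pos0 := strs.map (fun s => (s.length : Int))
    let fuel := (strs.map String.length).sum + 1
    String.ofList (mlcsLoopB fuel alphabet strs pos0 [])

-- ===== PRECONDITION & SPEC =====
-- Pre_ excludes only the empty list, on which the Python A raises ValueError.
def Pre_mlcs (strings : List String) : Prop := strings ≠ []
instance (strings : List String) : Decidable (Pre_mlcs strings) := by unfold Pre_mlcs; infer_instance
def pvWitness_mlcs : List String := (["abc", "cab"])
def Spec_mlcs (strings : List String) (out : String) : Prop := out = mlcs_alt strings
instance (strings : List String) (out : String) : Decidable (Spec_mlcs strings out) := by unfold Spec_mlcs; infer_instance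

-- ===== CLAIM (what is proved, stated in full; the proofs are below) =====
def Claim_equal_mlcs : Prop := ∀ (strings : List String), Dom_mlcs strings → Pre_mlcs strings → Spec_mlcs strings (mlcs strings)

-- ===== LEMMAS AND PROOFS =====

-- index positions of letter c in character list t, in increasing order, as Ints
def posIdxL (c : Char) (t : List Char) : List Int :=
  (PySem.List.enumerate t 0).filterMap (fun jl => if jl.2 = c then some jl.1 else none)

def posIdx (c : Char) (s : String) : List Int := posIdxL c s.toList

lemma posIdxL_pairwise (c : Char) (t : List Char) : (posIdxL c t).Pairwise (· < ·) := by
  unfold posIdxL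
  refine List.pairwise_filterMap.mpr ?_
  refine (PySem.List.pairwise_lt_enumerate t 0).imp ?_
  intro a b hab x hx y hy
  by_cases h1 : a.2 = c <;> simp [h1] at hx
  by_cases h2 : b.2 = c <;> simp [h2] at hy
  omega

lemma mem_posIdxL (c : Char) (t : List Char) (x : Int) :
    x ∈ posIdxL c t ↔ ∃ j : Nat, x = (j : Int) ∧ t[j]? = some c := by
  unfold posIdxL
  rw [List.mem_filterMap]
  constructor
  · rintro ⟨⟨j, ch⟩, hmem, hf⟩
    rw [PySem.List.mem_enumerate_iff] at hmem
    obtain ⟨k, hk, hp⟩ := hmem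
    cases hp
    by_cases hc : t[k] = c <;> simp [hc] at hf
    exact ⟨k, by omega, by simp [List.getElem?_eq_getElem hk, hc]⟩
  · rintro ⟨j, hx, hj⟩
    obtain ⟨hjlen, hjc⟩ := List.getElem?_eq_some_iff.mp hj
    refine ⟨((j : Int), c), ?_, by simp [hx]⟩
    rw [PySem.List.mem_enumerate_iff]
    exact ⟨j, hjlen, by simp [hjc]⟩

-- [c].isPrefixOf l tests exactly "the first character of l is c"
lemma isPrefixOf_single (c : Char) (l : List Char) : ([c].isPrefixOf l) = true ↔ l.head? = some c := by
  cases l with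
  | nil => rw [show ([c].isPrefixOf ([] : List Char)) = false from rfl]; simp
  | cons b bs =>
    rw [show ([c].isPrefixOf (b :: bs)) = (c == b && true) from rfl]
    simp only [Bool.and_true, beq_iff_eq, List.head?_cons, Option.some_inj]
    exact ⟨fun h => h.symm, fun h => h.symm⟩

lemma head?_drop' (u : List Char) (n : Nat) : u[n]? = (u.drop n).head? := by
  rw [List.head?_drop]

lemma go_succ (u : List Char) (c : Char) (n : Nat) :
    PySem.Chars.rfind.go u [c] (n+1) =
      if [c].isPrefixOf (u.drop (n+1)) then ((n : Int)+1) else PySem.Chars.rfind.go u [c] n := by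
  simp [PySem.Chars.rfind.go]

lemma go_zero (u : List Char) (c : Char) :
    PySem.Chars.rfind.go u [c] 0 = if [c].isPrefixOf u then 0 else -1 := by
  simp [PySem.Chars.rfind.go]

lemma rfind_go_char (u : List Char) (c : Char) :
    ∀ n : Nat,
      (PySem.Chars.rfind.go u [c] n = -1 ∧ ∀ j : Nat, j ≤ n → u[j]? ≠ some c) ∨
      (∃ j : Nat, j ≤ n ∧ PySem.Chars.rfind.go u [c] n = (j : Int) ∧ u[j]? = some c ∧
        ∀ k : Nat, j < k → k ≤ n → u[k]? ≠ some c)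
  | 0 => by
    rw [go_zero]
    by_cases h : [c].isPrefixOf u = true
    · right
      refine ⟨0, le_refl 0, by simp [h], ?_, by omega⟩
      rw [head?_drop', List.drop_zero]
      exact (isPrefixOf_single c u).mp h
    · left
      refine ⟨by simp [h], ?_⟩
      intro j hj
      interval_cases j
      rw [head?_drop', List.drop_zero]
      intro hc
      exact h ((isPrefixOf_single c u).mpr hc)
  | n + 1 => by
    rw [go_succ]
    by_cases h : [c].isPrefixOf (u.drop (n+1)) = true
    · right
      refine ⟨n+1, le_refl _, by simp [h], ?_, by omega⟩
      rw [head?_drop']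
      exact (isPrefixOf_single c _).mp h
    · have hne : u[n+1]? ≠ some c := by
        rw [head?_drop']
        intro hc
        exact h ((isPrefixOf_single c _).mpr hc)
      rcases rfind_go_char u c n with ⟨he, hall⟩ | ⟨j, hj, he, hc, hmax⟩
      · left
        refine ⟨by simp [h, he], ?_⟩
        intro j hj
        rcases Nat.lt_or_ge j (n+1) with h' | h'
        · exact hall j (by omega)
        · have : j = n+1 := by omega
          rw [this]; exact hne
      · right
        refine ⟨j, by omega, by simp [h, he], hc, ?_⟩
        intro k hk1 hk2
        rcases Nat.lt_or_ge k (n+1) with h' | h'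
        · exact hmax k hk1 (by omega)
        · have : k = n+1 := by omega
          rw [this]; exact hne

-- PySem.Chars.rfind with a single-character needle returns the highest index of that character
lemma rfind_single_char (u : List Char) (c : Char) :
    (PySem.Chars.rfind u [c] = -1 ∧ ∀ j : Nat, u[j]? ≠ some c) ∨
    (∃ j : Nat, PySem.Chars.rfind u [c] = (j : Int) ∧ u[j]? = some c ∧
      ∀ k : Nat, j < k → u[k]? ≠ some c) := by
  have h := rfind_go_char u c u.length
  rw [show PySem.Chars.rfind u [c] = PySem.Chars.rfind.go u [c] u.length from rfl] at *
  rcases h with ⟨he, hall⟩ | ⟨j, hj, he, hc, hmax⟩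
  · left
    refine ⟨he, fun j => ?_⟩
    rcases Nat.lt_or_ge j (u.length + 1) with h' | h'
    · exact hall j (by omega)
    · rw [List.getElem?_eq_none (by omega)]; simp
  · right
    refine ⟨j, he, hc, fun k hk => ?_⟩
    rcases Nat.lt_or_ge u.length k with h2 | h2
    · rw [List.getElem?_eq_none (by omega)]; simp
    · exact hmax k hk (by omega)

-- the per-string step: A's bisect over the precomputed index list of c equals B's rfind
lemma step_eq (t : List Char) (c : Char) (p : Int) (hp : 0 ≤ p) :
    (let ind := posIdxL c t
     let i : Int := (PySem.List.bisectRight ind (p - 1) : Int) - 1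
     match PySem.List.pyGet? ind i with
     | none => (none : Option Int)
     | some q => if i < 0 ∨ q > p - 1 then none else some q)
    = (let q := PySem.Chars.rfindFrom t [c] 0 (some p);
       if q < 0 then (none : Option Int) else some q) := by
  set ind := posIdxL c t with hind
  have hsorted := posIdxL_pairwise c t
  have hspec := PySem.List.bisectRight_spec ind (p - 1) (hsorted.imp (fun h => le_of_lt h))
  -- rewrite the rfind side
  have he : ∀ x : Int, x ∈ ind → 0 ≤ x := by
    intro x hx
    obtain ⟨j, hj, _⟩ := (mem_posIdxL c t x).mp hx
    omega
  -- e := min (len t) p as in rfindFrom with 0 ≤ p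
  have hrfrom : PySem.Chars.rfindFrom t [c] 0 (some p) =
      (if PySem.Chars.rfind (t.take (if (t.length : Int) < p then (t.length : Int) else p).toNat) [c] = -1
       then -1
       else PySem.Chars.rfind (t.take (if (t.length : Int) < p then (t.length : Int) else p).toNat) [c]) := by
    simp only [PySem.Chars.rfindFrom]
    have h0 : ¬ ((0:Int) < 0) := by omega
    split_ifs with h1 h2 h3 h4 h5 <;> simp_all <;> omega
  rw [hrfrom]
  dsimp only
  set e : Int := (if (t.length : Int) < p then (t.length : Int) else p) with hedef
  have he0 : 0 ≤ e := by rw [hedef]; split_ifs <;> omega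
  have hele : e ≤ p := by rw [hedef]; split_ifs <;> omega
  have helen : e.toNat ≤ t.length := by rw [hedef]; split_ifs <;> omega
  set u := t.take e.toNat with hu
  have humem : ∀ j : Nat, u[j]? = some c ↔ j < e.toNat ∧ t[j]? = some c := by
    intro j
    rw [hu, List.getElem?_take]
    split_ifs with h <;> simp [h]
  -- the "hit set" is the same on both sides
  have hiff : ∀ j : Nat, (u[j]? = some c) ↔ (((j:Int)) ∈ ind ∧ (j : Int) ≤ p - 1) := by
    intro j
    rw [humem, mem_posIdxL]
    constructor
    · rintro ⟨hje, hjc⟩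
      refine ⟨⟨j, rfl, hjc⟩, ?_⟩
      omega
    · rintro ⟨⟨j', hj', hjc⟩, hjp⟩
      have : j = j' := by omega
      subst this
      have hjlen : j < t.length := (List.getElem?_eq_some_iff.mp hjc).1
      refine ⟨?_, hjc⟩
      omega
  obtain ⟨hble, hlow, hhigh⟩ := hspec
  rcases hm : PySem.List.bisectRight ind (p - 1) with _ | m'
  · -- bisect returns 0: i = -1, A breaks; show rfind misses too
    rw [hm] at hhigh
    have hrnone : PySem.Chars.rfind u [c] = -1 := by
      rcases rfind_single_char u c with ⟨hne, _⟩ | ⟨j, hje, hjc, _⟩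
      · exact hne
      · exfalso
        obtain ⟨hmem, hjp⟩ := (hiff j).mp hjc
        obtain ⟨k, hk, hkval⟩ := List.mem_iff_getElem.mp hmem
        have := hhigh k hk (by omega)
        omega
    rw [show ((0:Nat):Int) - 1 = (-1 : Int) from by norm_num]
    cases hg : PySem.List.pyGet? ind (-1 : Int) with
    | none => simp [hrnone]
    | some q => simp [hrnone]
  · -- bisect returns m'+1: A yields ind[m'], show rfind returns the same index
    have hm'lt : m' < ind.length := by rw [hm] at hble; omega
    rw [show (((m' + 1 : Nat)):Int) - 1 = ((m' : Nat) : Int) from by push_cast; ring,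
       PySem.List.pyGet?_natCast, List.getElem?_eq_getElem hm'lt]
    set q := ind[m'] with hq
    have hqle : q ≤ p - 1 := by
      rw [hm] at hlow
      exact hlow m' hm'lt (by omega)
    have hqmem : q ∈ ind := List.mem_iff_getElem.mpr ⟨m', hm'lt, rfl⟩
    obtain ⟨j0, hj0, hj0c⟩ := (mem_posIdxL c t q).mp hqmem
    have hj0hit : u[j0]? = some c := (hiff j0).mpr ⟨by rwa [← hj0], by omega⟩
    rcases rfind_single_char u c with ⟨_, hnone⟩ | ⟨j1, hje, hj1c, hmax⟩
    · exact absurd hj0hit (hnone j0)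
    · -- j1 = j0
      have hj1le : j1 ≤ j0 → j0 ≤ j1 → j1 = j0 := by omega
      have h10 : j0 ≤ j1 := by
        by_contra hlt
        exact hmax j0 (by omega) hj0hit
      have h01 : j1 ≤ j0 := by
        obtain ⟨hmem1, hjp1⟩ := (hiff j1).mp hj1c
        obtain ⟨k, hk, hkval⟩ := List.mem_iff_getElem.mp hmem1
        rcases Nat.lt_or_ge k (m'+1) with hkm | hkm
        · -- ind[k] ≤ ind[m'] = q = j0
          rcases Nat.lt_or_ge k m' with hkm2 | hkm2
          · have := (List.pairwise_iff_getElem.mp hsorted) k m' hk hm'lt hkm2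
            rw [hkval, ← hq] at this
            omega
          · have hkm3 : k = m' := by omega
            subst hkm3
            rw [← hq] at hkval
            omega
        · rw [hm] at hhigh
          have := hhigh k hk (by omega)
          omega
      have hj10 : j1 = j0 := hj1le h01 h10
      have hqj : q = ((j1 : Nat) : Int) := by rw [hj0, hj10]
      rw [hje]
      rw [if_neg (show ¬ ((((j1:Nat)):Int)) = -1 from by omega)]
      rw [if_neg (show ¬ ((((j1:Nat)):Int) < 0) from by omega)]
      show (if (((m':Nat)):Int) < 0 ∨ q > p - 1 then none else some q) = _
      rw [if_neg (show ¬ ((((m':Nat)):Int) < 0 ∨ q > p - 1) from by rintro (h | h) <;> omega)]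
      rw [hqj]

lemma candLoop_eq (c : Char) :
    ∀ (strs : List String) (pos : List Int) (dist : Int) (cand : List Int),
      (∀ p ∈ pos, 0 ≤ p) →
      candLoopA (strs.map (fun s => posIdx c s)) pos dist cand = candLoopB c strs pos dist cand
  | [], pos, dist, cand, hpos => by cases pos <;> rfl
  | s :: ss, [], dist, cand, hpos => rfl
  | s :: ss, p :: ps, dist, cand, hpos => by
    have hp : (0:Int) ≤ p := hpos p (by simp)
    have hstep := step_eq s.toList c p hp
    dsimp only at hstep
    simp only [List.map_cons, candLoopA, candLoopB]
    rw [PySem.Str.rfindFrom_eq]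
    rw [show (String.ofList [c]).toList = [c] from by simp]
    rw [show posIdx c s = posIdxL c s.toList from rfl]
    rcases hg : PySem.List.pyGet? (posIdxL c s.toList)
        ((PySem.List.bisectRight (posIdxL c s.toList) (p - 1) : Int) - 1) with _ | q <;>
      simp only [hg] at hstep ⊢
    · split_ifs at hstep ⊢ with hB
      rfl
    · split_ifs at hstep ⊢ with h1 h2 <;> try first | rfl | (simp at hstep)
      all_goals
        rw [hstep]
        exact candLoop_eq c ss ps _ _ (fun x hx => hpos x (by simp [hx]))

lemma candidates_eq (al : List Char) (strs : List String) (items : List (Char × List (List Int)))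
    (hitems : items = al.map (fun c => (c, strs.map (fun s => posIdx c s))))
    (pos : List Int) (hpos : ∀ p ∈ pos, 0 ≤ p) :
    candidatesA items pos = candidatesB al strs pos := by
  subst hitems
  unfold candidatesA candidatesB
  rw [List.filterMap_map]
  refine List.filterMap_congr ?_
  intro c hc
  simp only [Function.comp]
  rw [candLoop_eq c strs pos 0 [] hpos]

-- candidates produced by B have only nonnegative entries
lemma candLoopB_nonneg (c : Char) :
    ∀ (strs : List String) (pos : List Int) (dist : Int) (cand : List Int) (r : Int × List Int),
      candLoopB c strs pos dist cand = some r → (∀ q ∈ cand, 0 ≤ q) → ∀ q ∈ r.2, 0 ≤ q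
  | [], pos, dist, cand, r, h, hc => by
    cases pos <;> simp only [candLoopB, Option.some_inj] at h <;> rw [← h] <;> exact hc
  | s :: ss, [], dist, cand, r, h, hc => by
    simp only [candLoopB, Option.some_inj] at h
    rw [← h]; exact hc
  | s :: ss, p :: ps, dist, cand, r, h, hc => by
    rw [show candLoopB c (s :: ss) (p :: ps) dist cand =
      (if PySem.Str.rfindFrom s (String.ofList [c]) 0 (some p) < 0 then none
       else candLoopB c ss ps (dist + (p - PySem.Str.rfindFrom s (String.ofList [c]) 0 (some p)) ^ 2)
         (cand ++ [PySem.Str.rfindFrom s (String.ofList [c]) 0 (some p)])) from rfl] at h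
    by_cases hneg : PySem.Str.rfindFrom s (String.ofList [c]) 0 (some p) < 0
    · rw [if_pos hneg] at h
      exact absurd h (by simp)
    · rw [if_neg hneg] at h
      refine candLoopB_nonneg c ss ps _ _ r h ?_
      intro q hq
      rcases List.mem_append.mp hq with hq | hq
      · exact hc q hq
      · simp only [List.mem_singleton] at hq
        rw [hq]
        omega

lemma foldl_pick_mem {a : Type} (f : a → a → Bool) :
    ∀ (xs : List a) (x : a), xs.foldl (fun b c => if f c b then c else b) x ∈ x :: xs
  | [], x => by simp
  | y :: ys, x => by
    simp only [List.foldl_cons]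
    have h := foldl_pick_mem f ys (if f y x then y else x)
    rcases List.mem_cons.mp h with h | h
    · rw [h]; split_ifs <;> simp
    · simp [List.mem_cons.mpr (Or.inr (List.mem_cons.mpr (Or.inr h)))]

lemma pyMin_mem (l : List (Int × Char × List Int)) (x : Int × Char × List Int)
    (h : pyMin l = some x) : x ∈ l := by
  unfold pyMin at h
  cases l with
  | nil => simp at h
  | cons x0 xs =>
    simp only [Option.some_inj] at h
    rw [← h]
    exact foldl_pick_mem candLt xs x0

lemma loop_eq (idx : PySem.Dict Char (List (List Int))) (al : List Char) (strs : List String)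
    (hitems : idx.items = al.map (fun c => (c, strs.map (fun s => posIdx c s)))) :
    ∀ (fuel : Nat) (pos : List Int) (resA : List Char),
      (∀ p ∈ pos, 0 ≤ p) →
      (mlcsLoopA fuel idx pos resA).reverse = mlcsLoopB fuel al strs pos resA.reverse
  | 0, pos, resA, hpos => rfl
  | fuel + 1, pos, resA, hpos => by
    simp only [mlcsLoopA, mlcsLoopB]
    rw [candidates_eq al strs idx.items hitems pos hpos]
    cases hmin : pyMin (candidatesB al strs pos) with
    | none => rfl
    | some dlc =>
      have hmem := pyMin_mem _ _ hmin
      have hnn : ∀ p ∈ dlc.2.2, (0:Int) ≤ p := by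
        unfold candidatesB at hmem
        rw [List.mem_filterMap] at hmem
        obtain ⟨c, _, hfc⟩ := hmem
        cases hcl : candLoopB c strs pos 0 [] with
        | none => rw [hcl] at hfc; simp at hfc
        | some r =>
          rw [hcl] at hfc
          simp only [Option.map_some, Option.some_inj] at hfc
          have hr := candLoopB_nonneg c strs pos 0 [] r hcl (by simp)
          intro x hx
          apply hr
          rw [← hfc] at hx
          exact hx
      rw [loop_eq idx al strs hitems fuel dlc.2.2 (resA ++ [dlc.2.1]) hnn]
      rw [show (resA ++ [dlc.2.1]).reverse = dlc.2.1 :: resA.reverse from by simp]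

-- building blocks for the index-table characterization
lemma init_items (v : List (List Int)) :
    ∀ (ks : List Char) (d : PySem.Dict Char (List (List Int))), ks.Nodup →
      (∀ k ∈ ks, d.contains k = false) →
      (ks.foldl (fun d c => d.insert c v) d).items = d.items ++ ks.map (fun c => (c, v))
  | [], d, _, _ => by simp
  | c :: ks, d, hnd, h => by
    simp only [List.foldl_cons]
    have hc : d.contains c = false := h c (by simp)
    have hins : (d.insert c v).items = d.items ++ [(c, v)] := by
      simp [PySem.Dict.insert, hc]
    rw [init_items v ks (d.insert c v) (List.nodup_cons.mp hnd).2 ?_, hins]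
    · simp
    · intro k hk
      have hck : c ≠ k := fun he => (List.nodup_cons.mp hnd).1 (he ▸ hk)
      have hdk : d.contains k = false := h k (by simp [hk])
      simp only [PySem.Dict.contains] at hdk ⊢
      rw [hins]
      simp [List.any_append, hck, hdk]

lemma find?_assoc_map (a : Char) (g : Char → List (List Int)) :
    ∀ (al : List Char), a ∈ al →
      List.find? (fun p => p.1 == a) (al.map (fun c => (c, g c))) = some (a, g a)
  | [], h => absurd h (by simp)
  | c :: cs, h => by
    by_cases hca : c = a
    · subst hca
      simp
    · rw [List.map_cons, List.find?_cons_of_neg (by simp [hca])]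
      refine find?_assoc_map a g cs ?_
      rcases List.mem_cons.mp h with h | h
      · exact absurd h.symm hca
      · exact h

lemma modify_items (al : List Char) (g : Char → List (List Int)) (a : Char)
    (d : PySem.Dict Char (List (List Int))) (f : List (List Int) → List (List Int))
    (hd : d.items = al.map (fun c => (c, g c))) (ha : a ∈ al) :
    (d.modify a [] f).items = al.map (fun c => (c, if c = a then f (g a) else g c)) := by
  have hget : d.getD a [] = g a := by
    simp [PySem.Dict.getD, PySem.Dict.get?, hd, find?_assoc_map a g al ha]
  have hcont : d.contains a = true := by
    simp only [PySem.Dict.contains, hd]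
    rw [List.any_eq_true]
    exact ⟨(a, g a), List.mem_map.mpr ⟨a, ha, rfl⟩, by simp⟩
  show (d.insert a (f (d.getD a []))).items = _
  rw [hget]
  simp only [PySem.Dict.insert, hcont, if_true]
  rw [hd, List.map_map]
  refine List.map_congr_left ?_
  intro c _
  by_cases hca : c = a <;> simp [Function.comp, hca]

lemma getD_set_self' (xs : List (List Int)) (k : Nat) (hk : k < xs.length) (v : List Int) :
    (xs.set k v).getD k [] = v := by
  rw [List.getD_eq_getElem _ _ (by simpa using hk)]
  exact List.getElem_set_self (by simpa using hk)

lemma inner_items (al : List Char) (k : Nat) :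
    ∀ (l : List (Int × Char)) (g : Char → List (List Int)) (d : PySem.Dict Char (List (List Int))),
      d.items = al.map (fun c => (c, g c)) →
      (∀ c ∈ al, k < (g c).length) →
      (l.foldl (fun d jl =>
          if PySem.Set.contains al jl.2 then
            d.modify jl.2 [] (fun ls =>
              PySem.List.pySetD ls (k : Int) (PySem.List.pyGetD ls (k : Int) [] ++ [jl.1]))
          else d) d).items
        = al.map (fun c => (c, (g c).set k ((g c).getD k [] ++
            l.filterMap (fun jl => if jl.2 = c then some jl.1 else none))))
  | [], g, d, hd, hlen => by
    rw [List.foldl_nil, hd]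
    refine List.map_congr_left ?_
    intro c hc
    have hk := hlen c hc
    rw [List.filterMap_nil, List.append_nil, List.getD_eq_getElem _ _ hk,
      List.set_getElem_self]
  | (j, a) :: l, g, d, hd, hlen => by
    rw [List.foldl_cons]
    by_cases hmem : a ∈ al
    · rw [if_pos (show PySem.Set.contains al a = true from (PySem.Set.contains_iff al a).mpr hmem)]
      have hmod := modify_items al g a d
        (fun ls => PySem.List.pySetD ls (k : Int) (PySem.List.pyGetD ls (k : Int) [] ++ [j])) hd hmem
      have hrec := inner_items al k l
        (fun c => if c = a then
            PySem.List.pySetD (g a) (k : Int) (PySem.List.pyGetD (g a) (k : Int) [] ++ [j])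
          else g c) _ hmod ?_
      · rw [hrec]
        refine List.map_congr_left ?_
        intro c hc
        have hkc := hlen c hc
        by_cases hca : c = a
        · subst hca
          simp only [if_true, PySem.List.pySetD_natCast,
            PySem.List.pyGetD_natCast]
          rw [getD_set_self' _ _ hkc, List.set_set, List.filterMap_cons]
          simp [List.append_assoc]
        · have hac : a ≠ c := fun h => hca h.symm
          simp [hca, hac]
      · intro c hc
        by_cases hca : c = a
        · subst hca
          simp only [if_true, PySem.List.pySetD_natCast,
            PySem.List.pyGetD_natCast]
          simpa using hlen c hc
        · simpa [hca] using hlen c hc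
    · rw [if_neg (by rw [PySem.Set.contains_iff]; exact hmem)]
      rw [inner_items al k l g d hd hlen]
      refine List.map_congr_left ?_
      intro c hc
      have hca : a ≠ c := fun he => hmem (he ▸ hc)
      simp [hca]

lemma outer_items (al : List Char) (strs : List String) :
    ∀ (todo : List String) (k : Nat) (pre : Char → List (List Int))
      (d : PySem.Dict Char (List (List Int))),
      d.items = al.map (fun c => (c, pre c ++ todo.map (fun _ => ([] : List Int)))) →
      (∀ c ∈ al, (pre c).length = k) →
      ((PySem.List.enumerate todo (k : Int)).foldl (fun d is =>
          (PySem.List.enumerate is.2.toList 0).foldl (fun d jl =>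
            if PySem.Set.contains al jl.2 then
              d.modify jl.2 [] (fun ls =>
                PySem.List.pySetD ls is.1 (PySem.List.pyGetD ls is.1 [] ++ [jl.1]))
            else d) d) d).items
        = al.map (fun c => (c, pre c ++ todo.map (fun s => posIdx c s)))
  | [], k, pre, d, hd, hpre => by
    rw [PySem.List.enumerate_nil, List.foldl_nil, hd]
    simp
  | s :: ss, k, pre, d, hd, hpre => by
    simp only [PySem.List.enumerate_cons, List.foldl_cons]
    have hin := inner_items al k (PySem.List.enumerate s.toList 0)
      (fun c => pre c ++ ([] : List Int) :: ss.map (fun _ => ([] : List Int))) d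
      (by rw [hd]; rfl) (by intro c hc; simp [hpre c hc])
    have hshape : ∀ c ∈ al,
        (((pre c ++ ([] : List Int) :: ss.map (fun _ => ([] : List Int))).set k
          ((pre c ++ ([] : List Int) :: ss.map (fun _ => ([] : List Int))).getD k [] ++
            (PySem.List.enumerate s.toList 0).filterMap
              (fun jl => if jl.2 = c then some jl.1 else none))))
        = (pre c ++ [posIdx c s]) ++ ss.map (fun _ => ([] : List Int)) := by
      intro c hc
      have hk := hpre c hc
      have hget : (pre c ++ ([] : List Int) :: ss.map (fun _ => ([] : List Int))).getD k [] = [] := by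
        rw [List.getD_eq_getElem _ _ (by simp; omega), List.getElem_append_right (by omega)]
        simp [hk]
      rw [hget, List.set_append, if_neg (by omega)]
      simp only [hk, Nat.sub_self, List.set_cons_zero, List.nil_append]
      simp
      rfl
    have hstep2 : (List.foldl (fun d jl =>
          if PySem.Set.contains al jl.2 then
            d.modify jl.2 [] (fun ls =>
              PySem.List.pySetD ls (k : Int) (PySem.List.pyGetD ls (k : Int) [] ++ [jl.1]))
          else d) d (PySem.List.enumerate s.toList 0)).items
        = al.map (fun c => (c, (fun c => pre c ++ [posIdx c s]) c ++ ss.map (fun _ => ([] : List Int)))) := by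
      rw [hin]
      refine List.map_congr_left ?_
      intro c hc
      rw [hshape c hc]
    have hrec := outer_items al strs ss (k + 1) (fun c => pre c ++ [posIdx c s]) _
      hstep2 (by intro c hc; simp [hpre c hc])
    rw [show ((k : Int) + 1) = (((k + 1 : Nat)) : Int) from by push_cast; ring, hrec]
    refine List.map_congr_left ?_
    intro c _
    simp

-- the index-table characterization: after A's two building loops the dict maps every
-- alphabet letter to the per-string lists of its positions
lemma items_characterization (al : List Char) (hal : al.Nodup) (strs : List String) :
    ((PySem.List.enumerate strs 0).foldl (fun d is =>
        (PySem.List.enumerate is.2.toList 0).foldl (fun d jl =>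
          if PySem.Set.contains al jl.2 then
            d.modify jl.2 [] (fun ls =>
              PySem.List.pySetD ls is.1 (PySem.List.pyGetD ls is.1 [] ++ [jl.1]))
          else d) d)
      (al.foldl (fun d c => d.insert c (strs.map (fun _ => ([] : List Int)))) PySem.Dict.empty)).items
    = al.map (fun c => (c, strs.map (fun s => posIdx c s))) := by
  have h0 : (al.foldl (fun d c => d.insert c (strs.map (fun _ => ([] : List Int)))) PySem.Dict.empty).items
      = al.map (fun c => (c, strs.map (fun _ => ([] : List Int)))) := by
    rw [init_items (strs.map (fun _ => ([] : List Int))) al PySem.Dict.empty hal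
      (fun k _ => rfl)]
    rfl
  have hmain := outer_items al strs strs 0 (fun _ => [])
      (al.foldl (fun d c => d.insert c (strs.map (fun _ => ([] : List Int)))) PySem.Dict.empty)
      h0 (fun c _ => rfl)
  rw [Nat.cast_zero] at hmain
  rw [hmain]
  refine List.map_congr_left ?_
  intro c _
  simp

lemma inter_foldl_nodup :
    ∀ (rest : List String) (acc : List Char), acc.Nodup →
      (rest.foldl (fun a s => PySem.Set.inter a (PySem.Set.ofList s.toList)) acc).Nodup
  | [], _, h => h
  | _ :: ss, _, h =>
    inter_foldl_nodup ss _ (h.filter _)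

lemma alphabet_nodup (s0 : String) (rest : List String) :
    (rest.foldl (fun a s => PySem.Set.inter a (PySem.Set.ofList s.toList))
      (PySem.Set.ofList s0.toList)).Nodup :=
  inter_foldl_nodup rest _ (PySem.Set.nodup_ofList _)

-- ===== VERDICT (by name: the statement is the Claim_ definition above) =====
theorem mlcs_spec : Claim_equal_mlcs := by
  intro strings _ _
  unfold Spec_mlcs mlcs mlcs_alt
  cases hs : PySem.Set.ofList strings with
  | nil => rfl
  | cons s0 rest =>
    dsimp only
    congr 1
    have hal := alphabet_nodup s0 rest
    rw [loop_eq _ _ _ (items_characterization _ hal (s0 :: rest)) _ _ []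
      (by
        intro p hp
        rw [List.mem_map] at hp
        obtain ⟨s, _, hps⟩ := hp
        rw [← hps]
        exact Int.natCast_nonneg _)]
    rfl
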